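-- pv_equiv track=rewrite | github.com/danielhuf/INF1025 | Lista_P1.py | qtAlg
-- ===== SOURCE A (Python) =====
-- def qtAlg(s):
--     if not s:
--         return -1
--     elif s[0]=='@':
--         return 0
--     else:
--         r=qtAlg(s[1:])
--         if r==-1:
--             return -1
--         else:
--             if s[0] in "0123456789":
--                 r=1+qtAlg(s[1:])
--             else:
--                 r=qtAlg(s[1:])
--     return r
-- ===== SOURCE B (Python) =====
-- def qtAlg(s):
--     head, sep, _ = s.partition('@')
--     if not sep:
--         return -1
--     return sum(c.isdigit() for c in head)
-- ===== Notes on version B (the rewrite author's own statement) =====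
-- stated objective: faster
-- what changed: Replaced the branching double recursion (which re-evaluates qtAlg(s[1:]) up to three times per character, exponential time) with str.partition at the first '@' followed by a digit count over the head, no recursion at all.
import Mathlib
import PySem

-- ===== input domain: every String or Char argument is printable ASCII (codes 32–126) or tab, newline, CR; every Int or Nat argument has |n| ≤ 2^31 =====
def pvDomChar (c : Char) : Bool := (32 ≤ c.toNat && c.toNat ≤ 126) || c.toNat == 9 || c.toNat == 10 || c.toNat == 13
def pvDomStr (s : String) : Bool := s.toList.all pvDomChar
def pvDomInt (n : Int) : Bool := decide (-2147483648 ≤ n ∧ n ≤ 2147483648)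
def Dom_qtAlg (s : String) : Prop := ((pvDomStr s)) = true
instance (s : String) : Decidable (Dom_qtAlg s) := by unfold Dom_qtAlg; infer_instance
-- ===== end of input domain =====

-- B replaces A's exponential double recursion by partition-at-'@' plus a digit count (no recursion).

-- ===== PORT A =====
-- A recurses on the tail s[1:]; here the string is its list of chars.
def qtAlgGo : List Char → Int
  | [] => -1
  | c :: t =>
      if c = '@' then 0
      else
        let r := qtAlgGo t
        if r = -1 then -1
        else if ("0123456789".toList.contains c) then 1 + qtAlgGo t
        else qtAlgGo t

def qtAlg (s : String) : Int := qtAlgGo s.toList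

-- ===== PORT B =====
-- s.partition('@') ported by hand (PySem has no partition): the head is the
-- run of characters before the first '@', and the separator is nonempty
-- exactly when '@' occurs in s — exact for a one-character separator.
def qtAlgPartitionHead (s : String) : List Char := s.toList.takeWhile (· ≠ '@')

def qtAlgSepFound (s : String) : Bool := s.toList.contains '@'

def qtAlg_alt (s : String) : Int :=
  if qtAlgSepFound s = false then -1
  else ((qtAlgPartitionHead s).countP (fun c => PySem.Chars.isdigit c)) -- sum of c.isdigit() over head

-- ===== PRECONDITION & SPEC =====
def Spec_qtAlg (s : String) (out : Int) : Prop := out = qtAlg_alt s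
instance (s : String) (out : Int) : Decidable (Spec_qtAlg s out) := by unfold Spec_qtAlg; infer_instance

-- ===== CLAIM (what is proved, stated in full; the proofs are below) =====
def Claim_equal_qtAlg : Prop := ∀ (s : String), Dom_qtAlg s → Spec_qtAlg s (qtAlg s)

-- ===== LEMMAS AND PROOFS =====

lemma char_eq_iff_toNat (c d : Char) : c = d ↔ c.toNat = d.toNat :=
  ⟨fun h => by rw [h], fun h => Char.ext (UInt32.toNat_inj.mp h)⟩

lemma digits_contains_eq (c : Char) :
    ("0123456789".toList.contains c) = PySem.Chars.isdigit c := by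
  have hl : "0123456789".toList = ['0','1','2','3','4','5','6','7','8','9'] := rfl
  have h0 : PySem.Chars.isdigit c = true ↔ (48 ≤ c.toNat ∧ c.toNat ≤ 57) := by
    simp only [PySem.Chars.isdigit, Bool.and_eq_true, decide_eq_true_eq]
    exact Iff.rfl
  have hc : (['0','1','2','3','4','5','6','7','8','9'].contains c = true) ↔
      (48 ≤ c.toNat ∧ c.toNat ≤ 57) := by
    simp only [List.contains_eq_mem, decide_eq_true_eq, List.mem_cons, List.not_mem_nil, or_false]
    simp only [char_eq_iff_toNat]
    constructor
    · rintro (h|h|h|h|h|h|h|h|h|h) <;> rw [h] <;> decide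
    · rintro ⟨h1, h2⟩
      simp only [show ('0').toNat = 48 from rfl, show ('1').toNat = 49 from rfl,
        show ('2').toNat = 50 from rfl, show ('3').toNat = 51 from rfl,
        show ('4').toNat = 52 from rfl, show ('5').toNat = 53 from rfl,
        show ('6').toNat = 54 from rfl, show ('7').toNat = 55 from rfl,
        show ('8').toNat = 56 from rfl, show ('9').toNat = 57 from rfl]
      omega
  rw [hl]
  exact Bool.eq_iff_iff.mpr (hc.trans h0.symm)

lemma qtAlgGo_eq (l : List Char) :
    qtAlgGo l = if '@' ∈ l then
      ((l.takeWhile (· ≠ '@')).countP (fun c => PySem.Chars.isdigit c) : Int) else -1 := by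
  induction l with
  | nil => rfl
  | cons c t ih =>
      simp only [qtAlgGo]
      by_cases hc : c = '@'
      · simp [hc, List.takeWhile]
      · have hc' : ¬ ('@' = c) := fun h => hc h.symm
        simp only [hc, if_false, ih, List.mem_cons, List.takeWhile]
        by_cases ht : '@' ∈ t
        · simp only [ht, if_true, or_true, digits_contains_eq, hc, decide_not]
          by_cases hdig : PySem.Chars.isdigit c = true <;> simp [hdig] <;> push_cast <;> ring
        · simp [ht, hc']


-- ===== VERDICT (by name: the statement is the Claim_ definition above) =====
theorem qtAlg_spec : Claim_equal_qtAlg := by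
  intro s _
  show qtAlg s = qtAlg_alt s
  unfold qtAlg qtAlg_alt qtAlgSepFound qtAlgPartitionHead
  rw [qtAlgGo_eq]
  by_cases h : '@' ∈ s.toList <;> simp [h]
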